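-- pv_equiv track=rewrite | github.com/cjxhaaa/stock_box | apps/api/app/engines/events.py | _cluster_direction
-- ===== SOURCE A (Python) =====
-- def _cluster_direction(items: list[dict[str, object]]) -> str:
--     positive = sum(1 for item in items if item["direction"] == "positive")
--     negative = sum(1 for item in items if item["direction"] == "negative")
--     if positive and negative:
--         return "mixed"
--     if positive:
--         return "positive"
--     if negative:
--         return "negative"
--     return "neutral"
-- ===== SOURCE B (Python) =====
-- _MERGE = {
--     ("neutral", "neutral"): "neutral",
--     ("neutral", "positive"): "positive",
--     ("neutral", "negative"): "negative",
--     ("positive", "neutral"): "positive",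
--     ("positive", "positive"): "positive",
--     ("positive", "negative"): "mixed",
--     ("negative", "neutral"): "negative",
--     ("negative", "positive"): "mixed",
--     ("negative", "negative"): "negative",
--     ("mixed", "neutral"): "mixed",
--     ("mixed", "positive"): "mixed",
--     ("mixed", "negative"): "mixed",
-- }
--
-- _DIR = {"positive": "positive", "negative": "negative"}
--
--
-- def _cluster_direction(items: list[dict[str, object]]) -> str:
--     # DFA over the classification monoid: the running state is already the
--     # answer; each item's direction drives a 12-entry transition table.
--     state = "neutral"
--     for item in items:
--         d = item["direction"]
--         state = _MERGE[(state, _DIR.get(d, "neutral"))]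
--     return state
-- ===== Notes on version B (the rewrite author's own statement) =====
-- stated objective: alternative
-- what changed: Replaced the two counting passes plus if-chain by a finite-state machine: the running state is itself the classification and each item's direction drives a 12-entry transition table (a fold in the classification monoid), with no counts, flags or final branch chain.
import Mathlib
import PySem

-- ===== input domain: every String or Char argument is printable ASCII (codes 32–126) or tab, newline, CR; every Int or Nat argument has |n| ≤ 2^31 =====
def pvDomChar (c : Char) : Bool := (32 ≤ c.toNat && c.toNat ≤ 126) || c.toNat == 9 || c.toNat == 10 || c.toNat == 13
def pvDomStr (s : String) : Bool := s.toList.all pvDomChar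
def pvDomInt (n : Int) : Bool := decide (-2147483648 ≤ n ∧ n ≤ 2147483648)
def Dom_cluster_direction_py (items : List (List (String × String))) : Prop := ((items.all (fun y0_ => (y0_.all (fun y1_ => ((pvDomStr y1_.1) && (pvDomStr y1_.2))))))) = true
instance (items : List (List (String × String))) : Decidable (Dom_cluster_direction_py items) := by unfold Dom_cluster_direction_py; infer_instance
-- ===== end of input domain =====

-- B replaces A's two counting passes + if-chain by a finite-state machine whose running state is the classification, driven by a 12-entry transition table (alternative decomposition).


-- ===== PORT A =====
-- item["direction"]: first-match association-list lookup (Python dict lookup)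
def pvLookupDir (item : List (String × String)) : Option String :=
  (item.find? (fun p => p.1 == "direction")).map (·.2)

def cluster_direction_py (items : List (List (String × String))) : String :=
  -- sum(1 for item in items if item["direction"] == "positive") — a count over one pass
  let positive := items.countP (fun item => pvLookupDir item == some "positive")
  let negative := items.countP (fun item => pvLookupDir item == some "negative")
  if positive ≠ 0 ∧ negative ≠ 0 then "mixed"
  else if positive ≠ 0 then "positive"
  else if negative ≠ 0 then "negative"
  else "neutral"

-- ===== PORT B =====
-- the module-level _MERGE dict of Source B, as an association list
def pvMergeTable : List ((String × String) × String) :=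
  [ (("neutral", "neutral"), "neutral"),
    (("neutral", "positive"), "positive"),
    (("neutral", "negative"), "negative"),
    (("positive", "neutral"), "positive"),
    (("positive", "positive"), "positive"),
    (("positive", "negative"), "mixed"),
    (("negative", "neutral"), "negative"),
    (("negative", "positive"), "mixed"),
    (("negative", "negative"), "negative"),
    (("mixed", "neutral"), "mixed"),
    (("mixed", "positive"), "mixed"),
    (("mixed", "negative"), "mixed") ]

-- _DIR.get(d, "neutral") of Source B (the two-entry _DIR dict, default "neutral")
def pvDirGet (d : Option String) : String :=
  if d == some "positive" then "positive"
  else if d == some "negative" then "negative"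
  else "neutral"

-- _MERGE[(state, d)]; the table is total on the states B ever reaches, so getD is never taken
def pvMergeStep (st : String) (item : List (String × String)) : String :=
  ((pvMergeTable.find? (fun p => p.1 == (st, pvDirGet (pvLookupDir item)))).map (·.2)).getD "neutral"

def cluster_direction_py_alt (items : List (List (String × String))) : String :=
  items.foldl pvMergeStep "neutral"

-- ===== PRECONDITION & SPEC =====
-- Pre_ excludes items missing the "direction" key, on which Python A raises KeyError (B raises there too).
def Pre_cluster_direction_py (items : List (List (String × String))) : Prop :=
  ∀ item ∈ items, ∃ p ∈ item, p.1 = "direction"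
instance (items : List (List (String × String))) : Decidable (Pre_cluster_direction_py items) := by unfold Pre_cluster_direction_py; infer_instance
def pvWitness_cluster_direction_py : (List (List (String × String))) := [[("direction", "positive")], [("direction", "neutral")]]

def Spec_cluster_direction_py (items : List (List (String × String))) (out : String) : Prop := out = cluster_direction_py_alt items
instance (items : List (List (String × String))) (out : String) : Decidable (Spec_cluster_direction_py items out) := by unfold Spec_cluster_direction_py; infer_instance

-- ===== CLAIM (what is proved, stated in full; the proofs are below) =====
def Claim_equal_cluster_direction_py : Prop := ∀ (items : List (List (String × String))), Dom_cluster_direction_py items → Pre_cluster_direction_py items → Spec_cluster_direction_py items (cluster_direction_py items)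

-- ===== LEMMAS AND PROOFS =====

-- count ≠ 0 iff some element satisfies the predicate
theorem pv_count_ne_any (items : List (List (String × String))) (p : List (String × String) → Bool) :
    (items.countP p ≠ 0) ↔ items.any p = true := by
  rw [Ne, List.countP_eq_zero, List.any_eq_true]
  simp [not_forall]

-- encode a pair of "seen positive / seen negative" flags as B's DFA state
def pvEnc (hp hn : Bool) : String :=
  if hp && hn then "mixed" else if hp then "positive" else if hn then "negative" else "neutral"

-- one DFA transition acts on the encoded flags exactly as OR-ing in the item's direction
theorem pv_step_enc (hp hn : Bool) (item : List (String × String)) :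
    pvMergeStep (pvEnc hp hn) item
      = pvEnc (hp || (pvLookupDir item == some "positive"))
              (hn || (pvLookupDir item == some "negative")) := by
  by_cases h1 : pvLookupDir item == some "positive"
  · have h2 : pvLookupDir item = some "positive" := by simpa using h1
    cases hp <;> cases hn <;>
      simp [pvMergeStep, pvDirGet, pvEnc, pvMergeTable, h1, h2]
  · by_cases h2 : pvLookupDir item == some "negative"
    · cases hp <;> cases hn <;>
        simp [pvMergeStep, pvDirGet, pvEnc, pvMergeTable, h1, h2]
    · cases hp <;> cases hn <;>
        simp [pvMergeStep, pvDirGet, pvEnc, pvMergeTable, h1, h2]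

-- B's whole fold computes the encoding of "any positive / any negative"
theorem pv_fold_enc (items : List (List (String × String))) (hp hn : Bool) :
    items.foldl pvMergeStep (pvEnc hp hn)
      = pvEnc (hp || items.any (fun item => pvLookupDir item == some "positive"))
              (hn || items.any (fun item => pvLookupDir item == some "negative")) := by
  induction items generalizing hp hn with
  | nil => simp
  | cons x xs ih =>
    rw [List.foldl_cons, pv_step_enc, ih]
    simp [List.any_cons, Bool.or_assoc]

-- ===== VERDICT (by name: the statement is the Claim_ definition above) =====
theorem cluster_direction_py_spec : Claim_equal_cluster_direction_py := by
  intro items _ _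
  unfold Spec_cluster_direction_py cluster_direction_py cluster_direction_py_alt
  have : pvEnc false false = "neutral" := by simp [pvEnc]
  rw [← this, pv_fold_enc]
  simp only [Bool.false_or, ne_eq, pv_count_ne_any]
  cases hP : items.any (fun item => pvLookupDir item == some "positive") <;>
  cases hN : items.any (fun item => pvLookupDir item == some "negative") <;>
    simp [pvEnc]
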